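-- pv_equiv track=rewrite | github.com/PasioteStudio/vadasz_denes | peti_alg.py | select_odd
-- ===== SOURCE A (Python) =====
-- def select_odd(graph):
--     counted = {}
--     result = []
--     #Collects the number of mention for every node
--     for i in graph:
--         try: counted[i[0]] += 1
--         except: counted[i[0]] = 1
--         try: counted[i[1]] += 1
--         except: counted[i[1]] = 1
--     #Selects the odd mention numbers
--     for i in counted:
--         if counted[i]%2!=0: result.append(i)
--     #Returns a simple array
--     return sorted(result)
-- ===== SOURCE B (Python) =====
-- def select_odd(graph):
--     odd = set()
--     for i in graph:
--         for x in (i[0], i[1]):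
--             if x in odd:
--                 odd.discard(x)
--             else:
--                 odd.add(x)
--     return sorted(odd)
-- ===== Notes on version B (the rewrite author's own statement) =====
-- stated objective: simpler
-- what changed: B replaces A's count-dictionary plus a second filtering pass by a single pass that toggles each endpoint in/out of a parity set, so the set always holds exactly the odd-degree nodes and is sorted directly.
import Mathlib
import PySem

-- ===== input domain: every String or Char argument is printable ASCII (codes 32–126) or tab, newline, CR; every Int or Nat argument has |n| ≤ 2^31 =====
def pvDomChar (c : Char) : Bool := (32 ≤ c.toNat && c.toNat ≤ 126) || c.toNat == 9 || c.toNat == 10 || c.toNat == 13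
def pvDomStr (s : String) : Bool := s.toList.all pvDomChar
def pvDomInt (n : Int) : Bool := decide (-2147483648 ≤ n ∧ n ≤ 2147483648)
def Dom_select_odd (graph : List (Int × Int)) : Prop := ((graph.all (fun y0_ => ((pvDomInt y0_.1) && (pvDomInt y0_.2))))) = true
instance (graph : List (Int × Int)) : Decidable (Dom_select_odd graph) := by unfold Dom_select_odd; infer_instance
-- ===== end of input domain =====

-- B drops A's count dictionary and separate filtering pass: one pass toggles each endpoint
-- in/out of a parity set, then sorts the set (objective: simpler; same return value).

-- ===== PORT A =====
-- try/except increment = Dict.modify with default 0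
def select_odd (graph : List (Int × Int)) : List Int :=
  let counted := graph.foldl
    (fun d i => (d.modify i.1 0 (· + 1)).modify i.2 0 (· + 1)) (PySem.Dict.empty : PySem.Dict Int Int)
  let result := counted.keys.foldl
    (fun r i => if PySem.Int.mod (counted.getD i 0) 2 ≠ 0 then r ++ [i] else r) []
  PySem.List.sorted result (fun x => x) false

-- ===== PORT B =====
def pvToggle (s : PySem.Set Int) (x : Int) : PySem.Set Int :=
  if s.contains x then s.discard x else s.add x

def select_odd_alt (graph : List (Int × Int)) : List Int :=
  PySem.List.sorted
    (graph.foldl (fun s i => pvToggle (pvToggle s i.1) i.2) (PySem.Set.empty : PySem.Set Int))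
    (fun x => x) false

-- ===== PRECONDITION & SPEC =====
def Spec_select_odd (graph : List (Int × Int)) (out : List Int) : Prop := out = select_odd_alt graph
instance (graph : List (Int × Int)) (out : List Int) : Decidable (Spec_select_odd graph out) := by unfold Spec_select_odd; infer_instance

-- ===== CLAIM (what is proved, stated in full; the proofs are below) =====
def Claim_equal_select_odd : Prop := ∀ (graph : List (Int × Int)), Dom_select_odd graph → Spec_select_odd graph (select_odd graph)

-- ===== LEMMAS AND PROOFS =====

def pvFlat (graph : List (Int × Int)) : List Int := graph.flatMap (fun i => [i.1, i.2])

theorem pvDictFold_eq (graph : List (Int × Int)) (d : PySem.Dict Int Int) :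
    graph.foldl (fun d i => (d.modify i.1 0 (· + 1)).modify i.2 0 (· + 1)) d
      = (pvFlat graph).foldl (fun d x => d.modify x 0 (· + 1)) d := by
  induction graph generalizing d with
  | nil => rfl
  | cons a t ih => simp [pvFlat, List.foldl] at *; exact ih _

theorem pvToggleFold_eq (graph : List (Int × Int)) (s : PySem.Set Int) :
    graph.foldl (fun s i => pvToggle (pvToggle s i.1) i.2) s
      = (pvFlat graph).foldl pvToggle s := by
  induction graph generalizing s with
  | nil => rfl
  | cons a t ih => simp [pvFlat, List.foldl] at *; exact ih _

theorem pvToggle_mem (l : List Int) (s : PySem.Set Int) (x : Int) :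
    x ∈ l.foldl pvToggle s ↔ ((x ∈ s) ↔ l.count x % 2 = 0) := by
  induction l generalizing s with
  | nil => simp
  | cons a t ih =>
    rw [List.foldl_cons, ih]
    by_cases hxa : x = a
    · subst hxa
      have hmem : x ∈ pvToggle s x ↔ ¬ x ∈ s := by
        by_cases hx : x ∈ s
        · simp [pvToggle, hx, PySem.Set.mem_discard]
        · simp [pvToggle, hx]
      rw [hmem, List.count_cons_self]
      by_cases hc : t.count x % 2 = 0
      · have h1 : (t.count x + 1) % 2 = 1 := by omega
        simp [hc, h1]
      · have h1 : (t.count x + 1) % 2 = 0 := by omega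
        simp [hc, h1]
    · have hmem : x ∈ pvToggle s a ↔ x ∈ s := by
        by_cases ha : a ∈ s
        · simp [pvToggle, ha, PySem.Set.mem_discard, hxa]
        · simp [pvToggle, ha, hxa]
      rw [hmem]
      simp [Ne.symm hxa]

theorem pvToggle_nodup (l : List Int) (s : PySem.Set Int) (h : s.Nodup) :
    (l.foldl pvToggle s).Nodup := by
  induction l generalizing s with
  | nil => exact h
  | cons a t ih =>
    rw [List.foldl_cons]
    apply ih
    unfold pvToggle
    split
    · exact PySem.Set.nodup_discard _ _ h
    · exact PySem.Set.nodup_add _ _ h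

theorem pvOdd_iff (n : Nat) : PySem.Int.mod (n : Int) 2 ≠ 0 ↔ ¬ n % 2 = 0 := by
  rw [show (2 : Int) = ((2 : Nat) : Int) from rfl, PySem.Int.mod_natCast]
  omega

theorem select_odd_spec' (graph : List (Int × Int)) :
    select_odd graph = select_odd_alt graph := by
  unfold select_odd select_odd_alt
  rw [pvDictFold_eq, pvToggleFold_eq, ← PySem.Dict.counter_eq_foldl]
  show PySem.List.sorted
      (List.foldl
        (fun r i => if PySem.Int.mod ((PySem.Dict.counter (pvFlat graph)).getD i 0) 2 ≠ 0 then r ++ [i] else r)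
        [] (PySem.Dict.counter (pvFlat graph)).keys) (fun x => x) false = _
  rw [PySem.List.foldl_append_ite_eq_filter
        (fun i => PySem.Int.mod ((PySem.Dict.counter (pvFlat graph)).getD i 0) 2 ≠ 0), List.nil_append]
  apply PySem.List.sorted_eq_sorted_of_perm _ _ _ (fun a b h => h)
  rw [List.perm_ext_iff_of_nodup]
  · intro x
    rw [List.mem_filter, PySem.Dict.keys_counter, PySem.Set.mem_ofList,
        pvToggle_mem, PySem.Dict.getD_counter]
    simp only [decide_eq_true_eq, pvOdd_iff, PySem.Set.empty, List.not_mem_nil, false_iff]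
    constructor
    · rintro ⟨hm, h⟩; exact h
    · intro h
      refine ⟨List.count_pos_iff.mp (by omega), h⟩
  · exact (PySem.Dict.keys_counter (pvFlat graph) ▸ PySem.Set.nodup_ofList _).filter _
  · exact pvToggle_nodup _ _ List.nodup_nil

-- ===== VERDICT (by name: the statement is the Claim_ definition above) =====
theorem select_odd_spec : Claim_equal_select_odd := by
  intro graph _
  exact select_odd_spec' graph
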